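-- pv_equiv track=rewrite | github.com/neha-soni-16/Automatic-Answer-Grader | dataHandler/preprocess.py | pruneLabel
-- ===== SOURCE A (Python) =====
-- def pruneLabel(text: str, max_text_len: int) -> str:
--     cost = 0
--     for i in range(len(text)):
--         if i != 0 and text[i] == text[i - 1]:
--             cost += 2
--         else:
--             cost += 1
--         if cost > max_text_len:
--             return text[:i]
--     return text
-- ===== SOURCE B (Python) =====
-- def pruneLabel(text: str, max_text_len: int) -> str:
--     # Build the strictly increasing prefix-cost table in one pass,
--     # then binary-search for the first index whose cost exceeds the limit.
--     costs = []
--     total = 0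
--     prev = None
--     for ch in text:
--         total += 2 if ch == prev else 1
--         costs.append(total)
--         prev = ch
--     lo, hi = 0, len(costs)
--     while lo < hi:
--         mid = (lo + hi) // 2
--         if costs[mid] > max_text_len:
--             hi = mid
--         else:
--             lo = mid + 1
--     return text[:lo]
-- ===== Notes on version B (the rewrite author's own statement) =====
-- stated objective: alternative
-- what changed: A's single accumulate-and-early-return scan is replaced by building a strictly increasing prefix-cost table in one pass and then binary-searching (bisect_right style, hand-written) for the first index whose cumulative cost exceeds the limit.
import Mathlib
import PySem

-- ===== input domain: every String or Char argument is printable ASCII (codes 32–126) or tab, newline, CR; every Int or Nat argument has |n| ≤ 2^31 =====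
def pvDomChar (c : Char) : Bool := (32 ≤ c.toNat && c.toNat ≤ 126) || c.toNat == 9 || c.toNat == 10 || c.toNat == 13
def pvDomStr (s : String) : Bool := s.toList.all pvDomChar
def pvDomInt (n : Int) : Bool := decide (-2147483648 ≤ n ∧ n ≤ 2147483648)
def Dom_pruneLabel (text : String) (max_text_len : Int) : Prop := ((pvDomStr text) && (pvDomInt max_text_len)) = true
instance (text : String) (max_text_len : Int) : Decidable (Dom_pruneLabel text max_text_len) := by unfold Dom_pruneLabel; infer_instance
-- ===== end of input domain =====

-- B replaces A's accumulate-and-early-return scan by a prefix-cost table plus binary search (alternative decomposition, same value everywhere).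


-- ===== PORT A =====
-- A's loop over i in range(len(text)) with accumulator cost; text[:i] with i ≥ 0 is take i.
def pruneLabelGo (cs : List Char) (mxt : Int) (cost : Int) (i : Nat) : String :=
  if h : i < cs.length then
    let cost' : Int :=
      if i ≠ 0 ∧ cs[i] = cs[i-1]'(Nat.lt_of_le_of_lt (Nat.pred_le i) h) then cost + 2 else cost + 1
    if cost' > mxt then String.mk (cs.take i)
    else pruneLabelGo cs mxt cost' (i+1)
  else String.mk cs
termination_by cs.length - i

def pruneLabel (text : String) (max_text_len : Int) : String :=
  pruneLabelGo text.toList max_text_len 0 0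

-- ===== PORT B =====
-- Source B's first pass: build the cumulative-cost list (loop state: total, prev).
def pruneCosts : List Char → Int → Option Char → List Int
  | [], _, _ => []
  | c :: rest, total, prev =>
    let total' := total + (if some c = prev then 2 else 1)
    total' :: pruneCosts rest total' (some c)

-- Source B's while-loop binary search (loop state: lo, hi); costs[mid] is in range whenever lo < hi ≤ len.
def pruneBS (costs : List Int) (mxt : Int) (lo hi : Nat) : Nat :=
  if lo < hi then
    let mid := (lo + hi) / 2
    if costs.getD mid 0 > mxt then pruneBS costs mxt lo mid
    else pruneBS costs mxt (mid+1) hi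
  else lo
termination_by hi - lo
decreasing_by all_goals omega

def pruneLabel_alt (text : String) (max_text_len : Int) : String :=
  let cs := text.toList
  let costs := pruneCosts cs 0 none
  String.mk (cs.take (pruneBS costs max_text_len 0 costs.length))

-- ===== PRECONDITION & SPEC =====
def Spec_pruneLabel (text : String) (max_text_len : Int) (out : String) : Prop := out = pruneLabel_alt text max_text_len
instance (text : String) (max_text_len : Int) (out : String) : Decidable (Spec_pruneLabel text max_text_len out) := by unfold Spec_pruneLabel; infer_instance

-- ===== CLAIM (what is proved, stated in full; the proofs are below) =====
def Claim_equal_pruneLabel : Prop := ∀ (text : String) (max_text_len : Int), Dom_pruneLabel text max_text_len → Spec_pruneLabel text max_text_len (pruneLabel text max_text_len)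

-- ===== LEMMAS AND PROOFS =====

lemma pruneCosts_length (cs : List Char) (t : Int) (p : Option Char) :
    (pruneCosts cs t p).length = cs.length := by
  induction cs generalizing t p with
  | nil => rfl
  | cons c rest ih => simp [pruneCosts, ih]

lemma pruneCosts_gt (cs : List Char) (t : Int) (p : Option Char) :
    ∀ x ∈ pruneCosts cs t p, t < x := by
  induction cs generalizing t p with
  | nil => simp [pruneCosts]
  | cons c rest ih =>
    intro x hx
    simp only [pruneCosts, List.mem_cons] at hx
    rcases hx with rfl | hx
    · split <;> omega
    · have := ih _ _ x hx
      split at this <;> omega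

lemma pruneCosts_sorted (cs : List Char) (t : Int) (p : Option Char) :
    (pruneCosts cs t p).Pairwise (· < ·) := by
  induction cs generalizing t p with
  | nil => simp [pruneCosts]
  | cons c rest ih =>
    simp only [pruneCosts, List.pairwise_cons]
    exact ⟨fun x hx => pruneCosts_gt _ _ _ x hx, ih _ _⟩

-- the binary search computes the first index whose cost strictly exceeds mxt
lemma pruneBS_eq_findIdx (l : List Int) (mxt : Int) (hs : l.Pairwise (· < ·)) :
    ∀ (n lo hi : Nat), hi - lo ≤ n → hi ≤ l.length →
      lo ≤ l.findIdx (fun c => decide (c > mxt)) →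
      l.findIdx (fun c => decide (c > mxt)) ≤ hi →
      pruneBS l mxt lo hi = l.findIdx (fun c => decide (c > mxt)) := by
  intro n
  induction n with
  | zero =>
    intro lo hi hn _ hlof hfhi
    rw [pruneBS]
    simp only [show ¬ lo < hi by omega, if_false]
    omega
  | succ n ih =>
    intro lo hi hn hhi hlof hfhi
    set F := l.findIdx (fun c => decide (c > mxt)) with hF
    rw [pruneBS]
    by_cases hlh : lo < hi
    · simp only [hlh, if_true]
      have hmlen : (lo + hi) / 2 < l.length := by omega
      by_cases hp : l.getD ((lo + hi) / 2) 0 > mxt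
      · simp only [hp, if_true]
        have hFm : F ≤ (lo + hi) / 2 := by
          by_contra hc
          have hlt := List.not_of_lt_findIdx (p := fun c => decide (c > mxt)) (xs := l)
            (by omega : (lo + hi) / 2 < F)
          rw [List.getD_eq_getElem l 0 hmlen] at hp
          simp at hlt; omega
        exact ih lo ((lo + hi) / 2) (by omega) (by omega) hlof hFm
      · simp only [hp, if_false]
        have hFm : (lo + hi) / 2 + 1 ≤ F := by
          by_contra hc
          have hFlen : F < l.length := by omega
          have hpf : l[F] > mxt := by
            have := List.findIdx_getElem (p := fun c => decide (c > mxt)) (w := hFlen)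
            simpa [← hF] using this
          rw [List.getD_eq_getElem l 0 hmlen] at hp
          rcases Nat.lt_or_ge F ((lo + hi) / 2) with hlt | hge
          · have := (List.pairwise_iff_getElem.mp hs) F ((lo + hi) / 2) hFlen hmlen hlt
            omega
          · have : F = (lo + hi) / 2 := by omega
            simp only [this] at hpf; omega
        exact ih ((lo + hi) / 2 + 1) hi (by omega) hhi hFm hfhi
    · simp only [hlh, if_false]
      omega

-- shared characterisation: A's loop from position done.length with accumulated cost
lemma pruneLabelGo_eq (mxt : Int) :
    ∀ (rest done : List Char) (cost : Int),
      pruneLabelGo (done ++ rest) mxt cost done.length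
        = String.mk ((done ++ rest).take
            (done.length + (pruneCosts rest cost done.getLast?).findIdx (fun c => decide (c > mxt)))) := by
  intro rest
  induction rest with
  | nil =>
    intro done cost
    rw [pruneLabelGo]
    simp [pruneCosts, List.findIdx_nil]
  | cons c rs ih =>
    intro done cost
    have hlen : done.length < (done ++ c :: rs).length := by simp
    rw [pruneLabelGo]
    simp only [hlen, dif_pos]
    have hget : (done ++ c :: rs)[done.length]'hlen = c := by simp
    -- the two increment conditions agree
    have hcond : (done.length ≠ 0 ∧
        (done ++ c :: rs)[done.length]'hlen
          = (done ++ c :: rs)[done.length - 1]'(Nat.lt_of_le_of_lt (Nat.pred_le _) hlen))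
        ↔ some c = done.getLast? := by
      cases hd : done.getLast? with
      | none =>
        have : done = [] := List.getLast?_eq_none_iff.mp hd
        subst this; simp
      | some d =>
        have hne : done ≠ [] := by intro h; subst h; simp at hd
        have hdlen : 0 < done.length := List.length_pos_iff.mpr hne
        have hprev : (done ++ c :: rs)[done.length - 1]'(Nat.lt_of_le_of_lt (Nat.pred_le _) hlen) = d := by
          rw [List.getElem_append_left (by omega)]
          rw [List.getLast?_eq_getElem?] at hd
          simpa [List.getElem?_eq_getElem (show done.length - 1 < done.length by omega)] using hd
        rw [hget, hprev]
        constructor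
        · rintro ⟨-, rfl⟩; rfl
        · intro h; exact ⟨by omega, Option.some.inj h⟩
    set inc : Int := if some c = done.getLast? then 2 else 1 with hinc
    have hcost' : (if (done.length ≠ 0 ∧
        (done ++ c :: rs)[done.length]'hlen
          = (done ++ c :: rs)[done.length - 1]'(Nat.lt_of_le_of_lt (Nat.pred_le _) hlen))
        then cost + 2 else cost + 1) = cost + inc := by
      by_cases h : some c = done.getLast?
      · rw [if_pos (hcond.mpr h), hinc, if_pos h]
      · rw [if_neg (fun hc => h (hcond.mp hc)), hinc, if_neg h]
    simp only [hcost']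
    have hcostsEq : pruneCosts (c :: rs) cost done.getLast?
        = (cost + inc) :: pruneCosts rs (cost + inc) (some c) := by
      simp [pruneCosts, hinc]
    rw [hcostsEq, List.findIdx_cons]
    by_cases hgt : cost + inc > mxt
    · simp [hgt]
    · simp only [show (decide (cost + inc > mxt)) = false by simpa using hgt, cond_false]
      have := ih (done ++ [c]) (cost + inc)
      rw [List.append_assoc] at this
      simp only [List.getLast?_concat, List.length_append, List.length_singleton] at this
      simp only [List.cons_append, List.nil_append] at this
      rw [if_neg (by simpa using hgt), this]
      congr 2
      omega

theorem pruneLabel_spec : Claim_equal_pruneLabel := by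
  intro text mxt _
  unfold Spec_pruneLabel pruneLabel pruneLabel_alt
  have hA := pruneLabelGo_eq mxt text.toList [] 0
  simp only [List.nil_append, List.length_nil, List.getLast?_nil, Nat.zero_add] at hA
  have hs := pruneCosts_sorted text.toList 0 none
  have hlen := pruneCosts_length text.toList 0 none
  have hB := pruneBS_eq_findIdx (pruneCosts text.toList 0 none) mxt hs
    ((pruneCosts text.toList 0 none).length) 0 ((pruneCosts text.toList 0 none).length)
    (by omega) le_rfl (Nat.zero_le _) (List.findIdx_le_length)
  rw [hA, ← hB]
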